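-- pv_equiv track=rewrite | github.com/Hiseen/pyproj | pytoys/pi.py | trashsort
-- ===== SOURCE A (Python) =====
-- def trashsort(array):
--     length=len(array)
--     newarray=[0 for x in range(length)]
--     for i in range(length):
--         for j in range(length):
--             if array[j]>i+1:
--                 newarray[i]+=1
--     return newarray;
-- ===== SOURCE B (Python) =====
-- def trashsort(array):
--     n = len(array)
--     if n == 0:
--         return []
--     # one pass: big = #elements > n; cnt = multiset of values in [2, n]
--     big = 0
--     cnt = {}
--     for v in array:
--         if v > n:
--             big += 1
--         elif v >= 2:
--             cnt[v] = cnt.get(v, 0) + 1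
--     # out[i] = #elements > i+1; suffix recurrence out[i] = out[i+1] + cnt.get(i+2, 0)
--     out = [big]
--     for i in range(n - 2, -1, -1):
--         out.append(out[-1] + cnt.get(i + 2, 0))
--     out.reverse()
--     return out
-- ===== Notes on version B (the rewrite author's own statement) =====
-- stated objective: faster
-- what changed: replaces the O(n^2) nested count loops by one counting pass (value histogram for values in [2,n] plus a count of values > n) followed by an O(n) back-to-front suffix-sum recurrence out[i] = out[i+1] + cnt[i+2]
import Mathlib
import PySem

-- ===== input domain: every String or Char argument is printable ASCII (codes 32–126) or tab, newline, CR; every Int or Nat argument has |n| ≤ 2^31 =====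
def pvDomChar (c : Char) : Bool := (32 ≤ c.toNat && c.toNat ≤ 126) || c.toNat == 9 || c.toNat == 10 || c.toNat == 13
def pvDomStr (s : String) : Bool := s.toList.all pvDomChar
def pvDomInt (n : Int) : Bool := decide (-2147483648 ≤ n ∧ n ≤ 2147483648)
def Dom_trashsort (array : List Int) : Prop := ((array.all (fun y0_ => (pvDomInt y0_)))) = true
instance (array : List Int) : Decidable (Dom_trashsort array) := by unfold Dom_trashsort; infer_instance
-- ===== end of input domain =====

-- B replaces A's O(n^2) nested counting loops by one counting pass plus an O(n) suffix-sum recurrence (objective: faster).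

-- ===== PORT A =====
def trashsort (array : List Int) : List Int :=
  let length : Int := array.length
  let newarray : List Int := (PySem.List.pyRange 0 length 1).map (fun _ => (0 : Int))
  (PySem.List.pyRange 0 length 1).foldl (fun na i =>
    (PySem.List.pyRange 0 length 1).foldl (fun na j =>
      if PySem.List.pyGetD array j 0 > i + 1
      then PySem.List.pySetD na i (PySem.List.pyGetD na i 0 + 1)
      else na) na) newarray

-- ===== PORT B =====
def trashsort_alt (array : List Int) : List Int :=
  let n : Int := array.length
  if array.length = 0 then [] else
  -- one pass: big = #elements > n; cnt = histogram of values in [2, n]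
  let st := array.foldl (fun (st : Int × PySem.Dict Int Int) v =>
      if v > n then (st.1 + 1, st.2)
      else if v ≥ 2 then (st.1, st.2.insert v (st.2.getD v 0 + 1))
      else st) (0, PySem.Dict.empty)
  let big := st.1
  let cnt := st.2
  -- suffix recurrence out[i] = out[i+1] + cnt.get(i+2, 0), built by append, then reversed
  let out := (PySem.List.pyRange (n - 2) (-1) (-1)).foldl
      (fun out i => out ++ [PySem.List.pyGetD out (-1) 0 + cnt.getD (i + 2) 0]) [big]
  out.reverse

-- ===== PRECONDITION & SPEC =====
def Spec_trashsort (array : List Int) (out : List Int) : Prop := out = trashsort_alt array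
instance (array : List Int) (out : List Int) : Decidable (Spec_trashsort array out) := by unfold Spec_trashsort; infer_instance

-- ===== CLAIM (what is proved, stated in full; the proofs are below) =====
def Claim_equal_trashsort : Prop := ∀ (array : List Int), Dom_trashsort array → Spec_trashsort array (trashsort array)

-- ===== LEMMAS AND PROOFS =====

-- the common target: output cell k is the number of elements greater than k+1
def pvF (array : List Int) (k : Int) : Int := (array.countP (fun v => decide (v > k + 1)) : Int)

theorem pvF_step (array : List Int) (i : Int) :
    pvF array i = pvF array (i + 1) + (array.count (i + 2) : Int) := by
  induction array with
  | nil => simp [pvF]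
  | cons x xs ih =>
    simp only [pvF, List.countP_cons, List.count_cons, beq_iff_eq, gt_iff_lt] at ih ⊢
    push_cast
    by_cases h1 : i + 1 < x <;> by_cases h2 : i + 1 + 1 < x <;> by_cases h3 : x = i + 2 <;>
      simp only [h1, h2, h3, decide_true, decide_false, decide_eq_true_eq,
        if_pos, if_neg, not_false_iff] <;>
      simp [h1, h2, h3] <;> omega

theorem passB (n : Int) : ∀ (xs : List Int) (b0 : Int) (d0 : PySem.Dict Int Int),
    xs.foldl (fun (st : Int × PySem.Dict Int Int) v =>
      if v > n then (st.1 + 1, st.2)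
      else if v ≥ 2 then (st.1, st.2.insert v (st.2.getD v 0 + 1))
      else st) (b0, d0)
    = (b0 + (xs.countP (fun v => decide (v > n)) : Int),
       (xs.filter (fun v => decide (v ≤ n) && decide (2 ≤ v))).foldl
         (fun d x => d.insert x (d.getD x 0 + 1)) d0) := by
  intro xs
  induction xs with
  | nil => intro b0 d0; simp
  | cons x xs ih =>
    intro b0 d0
    simp only [List.foldl_cons, List.countP_cons, List.filter_cons]
    by_cases h1 : x > n
    · rw [if_pos h1, ih]
      simp [h1, show ¬ x ≤ n by omega]
      push_cast; ring
    · rw [if_neg h1]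
      by_cases h2 : x ≥ 2
      · rw [if_pos h2, ih]
        simp [h1, h2, show x ≤ n by omega, show ¬ n < x by omega]
      · rw [if_neg h2, ih]
        simp [h1, h2, show ¬ n < x by omega, show ¬ 2 ≤ x by omega]

theorem suffB (array : List Int) (cnt : PySem.Dict Int Int)
    (hcnt : ∀ i : Nat, (i : Int) ≤ (array.length : Int) - 2 →
      cnt.getD ((i : Int) + 2) 0 = (array.count ((i : Int) + 2) : Int)) :
    ∀ (m : Nat), (m : Int) ≤ (array.length : Int) - 2 → ∀ (L : List Int),
    (PySem.List.pyRange (m : Int) (-1) (-1)).foldl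
      (fun out i => out ++ [PySem.List.pyGetD out (-1) 0 + cnt.getD (i + 2) 0])
      (L ++ [pvF array ((m : Int) + 1)])
    = L ++ (((List.range (m + 2)).map (fun (k : Nat) => pvF array (k : Int))).reverse) := by
  intro m
  induction m with
  | zero =>
    intro hm L
    rw [PySem.List.pyRange_neg_one_cons (by norm_num),
        show ((0 : Nat) : Int) - 1 = -1 by norm_num,
        PySem.List.pyRange_neg_one_eq_nil le_rfl]
    simp only [List.foldl_cons, List.foldl_nil, PySem.List.pyGetD_neg_one_append_singleton,
      Nat.cast_zero]
    rw [show ((0 : Int) + 2) = ((0 : Nat) : Int) + 2 by norm_num, hcnt 0 (by omega)]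
    have hv : pvF array (0 + 1) + ((array.count (((0 : Nat) : Int) + 2)) : Int) = pvF array 0 := by
      rw [pvF_step array 0]; norm_num
    rw [hv]
    simp [List.range_succ, List.append_assoc]
  | succ m ih =>
    intro hm L
    rw [show ((m + 1 : Nat) : Int) = (m : Int) + 1 by push_cast; ring]
    rw [PySem.List.pyRange_neg_one_cons (by omega)]
    simp only [List.foldl_cons, PySem.List.pyGetD_neg_one_append_singleton,
      show (m : Int) + 1 - 1 = (m : Int) by ring]
    rw [show (m : Int) + 1 + 2 = ((m + 1 : Nat) : Int) + 2 by push_cast; ring,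
        hcnt (m + 1) (by push_cast; push_cast at hm; omega)]
    have hv : pvF array ((m : Int) + 1 + 1) + ((array.count (((m + 1 : Nat) : Int) + 2)) : Int)
        = pvF array ((m : Int) + 1) := by
      rw [pvF_step array ((m : Int) + 1)]; push_cast; ring_nf
    rw [hv, ih (by omega) (L ++ [pvF array ((m : Int) + 1 + 1)])]
    simp [List.range_succ, show ((m : Int) + 1 + 1) = (m : Int) + 2 by ring, List.append_assoc]

theorem set_getD_self (na : List Int) (i : Nat) (h : i < na.length) :
    na.set i (na.getD i 0) = na := by
  apply List.ext_getElem
  · simp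
  · intro k hk hk'
    simp [List.getElem_set]
    intro hik; subst hik; simp [List.getElem?_eq_getElem h]

theorem innerA (i : Nat) : ∀ (xs na : List Int), i < na.length →
    xs.foldl (fun na v => if v > (i : Int) + 1
        then PySem.List.pySetD na (i : Int) (PySem.List.pyGetD na (i : Int) 0 + 1) else na) na
    = na.set i (na.getD i 0 + (xs.countP (fun v => decide (v > (i : Int) + 1)) : Int)) := by
  intro xs
  induction xs with
  | nil =>
    intro na h
    simp only [List.foldl_nil, List.countP_nil, Nat.cast_zero, add_zero]
    exact (set_getD_self na i h).symm
  | cons x xs ih =>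
    intro na h
    simp only [List.foldl_cons, List.countP_cons]
    by_cases hx : x > (i : Int) + 1
    · rw [if_pos hx]
      rw [PySem.List.pySetD_natCast, PySem.List.pyGetD_natCast]
      rw [ih _ (by simpa using h)]
      rw [List.set_set]
      congr 1
      rw [List.getD_eq_getElem _ _ (by simpa using h), List.getElem_set_self (by simpa using h)]
      rw [List.getD_eq_getElem _ _ h]
      simp [hx]
      push_cast
      ring
    · rw [if_neg hx, ih _ h]
      simp [hx]

-- after the inner loop, iteration i sets cell i to pvF array i
theorem outerA (array : List Int) (m : Nat) (hm : m ≤ array.length) :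
    (PySem.List.pyRange 0 (m : Int) 1).foldl (fun na i =>
      (PySem.List.pyRange 0 (array.length : Int) 1).foldl (fun na j =>
        if PySem.List.pyGetD array j 0 > i + 1
        then PySem.List.pySetD na i (PySem.List.pyGetD na i 0 + 1)
        else na) na) ((PySem.List.pyRange 0 (array.length : Int) 1).map (fun _ => (0 : Int)))
    = (List.range array.length).map (fun k => if k < m then pvF array (k : Int) else 0) := by
  induction m with
  | zero =>
    simp [PySem.List.pyRange_one, Function.comp_def, List.map_const']
  | succ m ih =>
    have hm' : m ≤ array.length := Nat.le_of_succ_le hm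
    have hsplit : PySem.List.pyRange 0 ((m : Int) + 1) 1
        = PySem.List.pyRange 0 (m : Int) 1 ++ [(m : Int)] :=
      PySem.List.pyRange_one_succ_right (by positivity)
    rw [show ((m + 1 : Nat) : Int) = (m : Int) + 1 by push_cast; ring, hsplit,
        List.foldl_append, ih hm']
    simp only [List.foldl_cons, List.foldl_nil]
    rw [PySem.List.foldl_pyRange_zero_pyGetD' array 0
      (fun na v => if v > (m : Int) + 1 then PySem.List.pySetD na (m : Int) (PySem.List.pyGetD na (m : Int) 0 + 1) else na)]
    rw [innerA m array _ (by simp; omega)]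
    have hgetD : ((List.range array.length).map
        (fun k => if k < m then pvF array (k : Int) else 0)).getD m 0 = 0 := by
      rw [List.getD_eq_getElem _ _ (by simpa using hm)]
      simp
    rw [hgetD, zero_add]
    apply List.ext_getElem
    · simp
    · intro k hk hk'
      have hkn : k < array.length := by simpa using hk'
      rcases Nat.lt_trichotomy k m with h | h | h
      · simp [List.getElem_set, show m ≠ k by omega, hkn, h, show k < m + 1 by omega]
        intro hh
        exact absurd hh (by omega)
      · subst h
        simp [List.getElem_set, hkn, pvF]
      · simp [List.getElem_set, show m ≠ k by omega, hkn, show ¬ k < m by omega,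
          show ¬ k < m + 1 by omega]
        intro hh
        exact absurd hh (by omega)

theorem trashsort_alt_charact (array : List Int) :
    trashsort_alt array = (List.range array.length).map (fun (k : Nat) => pvF array (k : Int)) := by
  by_cases h0 : array.length = 0
  · simp [trashsort_alt, h0]
  · simp only [trashsort_alt, if_neg h0]
    rw [passB (array.length : Int) array 0 PySem.Dict.empty]
    rw [PySem.Dict.foldl_insert_getD_add_one_eq_counter]
    have hcnt : ∀ i : Nat, (i : Int) ≤ (array.length : Int) - 2 →
        (PySem.Dict.counter (array.filter
          (fun v => decide (v ≤ (array.length : Int)) && decide (2 ≤ v)))).getD ((i : Int) + 2) 0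
        = (array.count ((i : Int) + 2) : Int) := by
      intro i hi
      rw [PySem.Dict.getD_counter]
      rw [List.count_filter (by simp; omega)]
    have hbig : (0 : Int) + (array.countP (fun v => decide (v > (array.length : Int))) : Int)
        = pvF array ((array.length : Int) - 1) := by
      simp only [pvF, zero_add, sub_add_cancel]
    simp only [hbig]
    by_cases h1 : array.length = 1
    · rw [show ((array.length : Int) - 2) = -1 by rw [h1]; norm_num,
        PySem.List.pyRange_neg_one_eq_nil le_rfl]
      simp only [List.foldl_nil, h1]
      simp [pvF]
    · have h2 : 2 ≤ array.length := by omega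
      have hm : ((array.length - 2 : Nat) : Int) = (array.length : Int) - 2 := by
        push_cast [h2]; ring
      rw [show ([pvF array ((array.length : Int) - 1)] : List Int)
          = [] ++ [pvF array (((array.length - 2 : Nat) : Int) + 1)] by
            rw [hm, show (array.length : Int) - 2 + 1 = (array.length : Int) - 1 by ring]; simp]
      rw [← hm,
        suffB array _ hcnt (array.length - 2) (by omega) [],
        show array.length - 2 + 2 = array.length by omega]
      simp

theorem trashsort_charact (array : List Int) :
    trashsort array = (List.range array.length).map (fun (k : Nat) => pvF array (k : Int)) := by
  simp only [trashsort]
  rw [outerA array array.length le_rfl]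
  apply List.ext_getElem
  · simp
  · intro k hk hk'
    have hkn : k < array.length := by simpa using hk
    simp [hkn]

-- ===== VERDICT (by name: the statement is the Claim_ definition above) =====
theorem trashsort_spec : Claim_equal_trashsort := by
  intro array _
  unfold Spec_trashsort
  rw [trashsort_charact, trashsort_alt_charact]
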